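-- pv_equiv track=rewrite | github.com/marcelo-lara/ai-light-song-v2 | src/analyzer/stages/patterns.py | _display_sequence
-- ===== SOURCE A (Python) =====
-- def _display_sequence(labels: list[str]) -> str:
--     if not labels:
--         return ""
--
--     runs: list[tuple[str, int]] = []
--     for label in labels:
--         if runs and runs[-1][0] == label:
--             previous_label, previous_count = runs[-1]
--             runs[-1] = (previous_label, previous_count + 1)
--             continue
--         runs.append((label, 1))
--
--     parts = [runs[0][0]]
--     for index in range(1, len(runs)):
--         previous_count = runs[index - 1][1]
--         label, count = runs[index]
--         delimiter = "→" if previous_count > 1 or count > 1 else "|"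
--         parts.append(f"{delimiter}{label}")
--     return "".join(parts)
-- ===== SOURCE B (Python) =====
-- def _piece(prev_count: int, cur_count: int, label: str) -> str:
--     if prev_count == 0:
--         return label
--     delimiter = "\u2192" if prev_count > 1 or cur_count > 1 else "|"
--     return delimiter + label
--
--
-- def _display_sequence(labels: list[str]) -> str:
--     # single streaming pass: no intermediate run list is materialized
--     if not labels:
--         return ""
--     pieces = []
--     cur_label = labels[0]
--     cur_count = 1
--     prev_count = 0
--     for label in labels[1:]:
--         if label == cur_label:
--             cur_count += 1
--         else:
--             pieces.append(_piece(prev_count, cur_count, cur_label))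
--             prev_count, cur_label, cur_count = cur_count, label, 1
--     pieces.append(_piece(prev_count, cur_count, cur_label))
--     return "".join(pieces)
-- ===== Notes on version B (the rewrite author's own statement) =====
-- stated objective: alternative
-- what changed: A materializes the full run-length-encoded list in one pass and renders it in a second indexed pass; B is a single streaming pass keeping only the current label, its count and the previous run's count, emitting each piece the moment a run closes.
import Mathlib
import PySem

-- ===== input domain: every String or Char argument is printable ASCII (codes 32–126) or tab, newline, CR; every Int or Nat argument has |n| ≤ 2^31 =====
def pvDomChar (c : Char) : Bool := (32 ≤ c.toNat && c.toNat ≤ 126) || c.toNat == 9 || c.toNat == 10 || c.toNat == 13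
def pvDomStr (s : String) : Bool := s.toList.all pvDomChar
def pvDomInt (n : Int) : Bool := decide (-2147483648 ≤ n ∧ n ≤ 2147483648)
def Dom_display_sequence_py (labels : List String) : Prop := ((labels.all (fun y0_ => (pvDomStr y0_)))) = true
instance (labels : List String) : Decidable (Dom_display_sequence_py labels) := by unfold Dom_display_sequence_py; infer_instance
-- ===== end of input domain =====

-- B fuses A's two passes (build the run list, then render it by index) into one
-- streaming pass with O(1) extra state; same output, proved equal (objective: alternative).

-- ===== PORT A =====
-- one step of A's first loop: merge into the last run or append a new one
def pvStepA (runs : List (String × Int)) (label : String) : List (String × Int) :=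
  if runs ≠ [] ∧ (PySem.List.pyGetD runs (-1) ("", 0)).1 = label then
    PySem.List.pySetD runs (-1)
      ((PySem.List.pyGetD runs (-1) ("", 0)).1, (PySem.List.pyGetD runs (-1) ("", 0)).2 + 1)
  else runs ++ [(label, 1)]

def display_sequence_py (labels : List String) : String :=
  if labels = [] then "" else
  let runs : List (String × Int) := labels.foldl pvStepA []
  let parts : List String :=
    (PySem.List.pyRange 1 (runs.length) 1).foldl (fun parts index =>
      let previous_count := (PySem.List.pyGetD runs (index - 1) ("", 0)).2
      let lc := PySem.List.pyGetD runs index ("", 0)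
      let delimiter := if previous_count > 1 ∨ lc.2 > 1 then "→" else "|"
      parts ++ [delimiter ++ lc.1]) [(PySem.List.pyGetD runs 0 ("", 0)).1]
  PySem.Str.join "" parts

-- ===== PORT B =====
def pvPiece (prev_count cur_count : Int) (label : String) : String :=
  if prev_count = 0 then label
  else (if prev_count > 1 ∨ cur_count > 1 then "→" else "|") ++ label

-- the streaming loop of Source B over labels[1:]
def pvGoB (pieces : List String) (cur_label : String) (cur_count prev_count : Int) :
    List String → List String
  | [] => pieces ++ [pvPiece prev_count cur_count cur_label]
  | label :: rest =>
    if label = cur_label then pvGoB pieces cur_label (cur_count + 1) prev_count rest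
    else pvGoB (pieces ++ [pvPiece prev_count cur_count cur_label]) label 1 cur_count rest

def display_sequence_py_alt (labels : List String) : String :=
  match labels with
  | [] => ""
  | l0 :: rest => PySem.Str.join "" (pvGoB [] l0 1 0 rest)

-- ===== PRECONDITION & SPEC =====
def Spec_display_sequence_py (labels : List String) (out : String) : Prop := out = display_sequence_py_alt labels
instance (labels : List String) (out : String) : Decidable (Spec_display_sequence_py labels out) := by unfold Spec_display_sequence_py; infer_instance

-- ===== CLAIM (what is proved, stated in full; the proofs are below) =====
def Claim_equal_display_sequence_py : Prop := ∀ (labels : List String), Dom_display_sequence_py labels → Spec_display_sequence_py labels (display_sequence_py labels)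

-- ===== LEMMAS AND PROOFS =====

-- the run-length encoding of (l repeated c times) ++ rest, head-structural
def pvRuns (l : String) (c : Int) : List String → List (String × Int)
  | [] => [(l, c)]
  | x :: xs => if x = l then pvRuns l (c + 1) xs else (l, c) :: pvRuns x 1 xs

-- delimiter-prefixed labels for successive runs, given the previous run's count
def pvAdj (c : Int) : List (String × Int) → List String
  | [] => []
  | (l', c') :: rs => ((if c > 1 ∨ c' > 1 then "→" else "|") ++ l') :: pvAdj c' rs

theorem pvRuns_ne_nil (l : String) (c : Int) (xs : List String) : pvRuns l c xs ≠ [] := by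
  induction xs generalizing l c with
  | nil => simp [pvRuns]
  | cons x xs ih => simp only [pvRuns]; split <;> simp [ih]

-- A's first loop computes pvRuns
theorem foldl_stepA (xs : List String) (acc : List (String × Int)) (l : String) (c : Int) :
    xs.foldl pvStepA (acc ++ [(l, c)]) = acc ++ pvRuns l c xs := by
  induction xs generalizing acc l c with
  | nil => simp [pvRuns]
  | cons x xs ih =>
    simp only [List.foldl_cons, pvRuns]
    by_cases hx : x = l
    · subst hx
      have : pvStepA (acc ++ [(x, c)]) x = acc ++ [(x, c + 1)] := by
        simp [pvStepA, PySem.List.pySetD, PySem.List.pySet?, PySem.List.pyIdx?]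
      rw [this, ih, if_pos rfl]
    · have hx' : ¬ l = x := fun h => hx h.symm
      have : pvStepA (acc ++ [(l, c)]) x = (acc ++ [(l, c)]) ++ [(x, 1)] := by
        simp [pvStepA, hx']
      rw [this, ih, if_neg hx]
      simp

-- A's second loop, after turning the fold into a map over the range
theorem map_adj (rs : List (String × Int)) (l : String) (c : Int) :
    (List.range rs.length).map (fun k =>
      (if (((l, c) :: rs).getD k ("", 0)).2 > 1 ∨ (((l, c) :: rs).getD (k + 1) ("", 0)).2 > 1
        then "→" else "|") ++ (((l, c) :: rs).getD (k + 1) ("", 0)).1) = pvAdj c rs := by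
  induction rs generalizing l c with
  | nil => simp [pvAdj]
  | cons p rs ih =>
    obtain ⟨l', c'⟩ := p
    rw [List.length_cons, List.range_succ_eq_map, List.map_cons, List.map_map]
    simp only [pvAdj]
    congr 1
    refine Eq.trans (List.map_congr_left ?_) (ih l' c')
    intro k _
    rfl

-- B's loop renders pvRuns with the delimiter pieces
theorem goB_spec (xs : List String) (pieces : List String) (l : String) (c pc : Int)
    (hc : 1 ≤ c) :
    pvGoB pieces l c pc xs =
      pieces ++ pvPiece pc ((pvRuns l c xs).headD ("", 0)).2 ((pvRuns l c xs).headD ("", 0)).1 ::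
        pvAdj ((pvRuns l c xs).headD ("", 0)).2 ((pvRuns l c xs).tail) := by
  induction xs generalizing pieces l c pc with
  | nil => simp [pvGoB, pvRuns, pvAdj]
  | cons x xs ih =>
    simp only [pvGoB, pvRuns]
    by_cases hx : x = l
    · rw [if_pos hx, if_pos hx, ih _ _ _ _ (by omega)]
    · rw [if_neg hx, if_neg hx, ih (pieces ++ [pvPiece pc c l]) x 1 c (by omega)]
      simp only [List.headD_cons, List.tail_cons]
      have hpc : pvPiece c ((pvRuns x 1 xs).headD ("", 0)).2 ((pvRuns x 1 xs).headD ("", 0)).1 =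
          ((if c > 1 ∨ ((pvRuns x 1 xs).headD ("", 0)).2 > 1 then "→" else "|") ++
            ((pvRuns x 1 xs).headD ("", 0)).1) := by
        unfold pvPiece; rw [if_neg (by omega)]
      cases hr : pvRuns x 1 xs with
      | nil => exact absurd hr (pvRuns_ne_nil _ _ _)
      | cons q qs =>
        obtain ⟨l2, c2⟩ := q
        rw [hr] at hpc
        simp only [List.headD_cons] at hpc
        simp only [List.headD_cons, List.tail_cons, pvAdj, hpc]
        simp

theorem runs_build (l0 : String) (rest : List String) :
    (l0 :: rest).foldl pvStepA [] = pvRuns l0 1 rest := by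
  have h0 : pvStepA [] l0 = [] ++ [(l0, 1)] := by simp [pvStepA]
  rw [List.foldl_cons, h0, foldl_stepA]
  simp

theorem display_sequence_py_spec : Claim_equal_display_sequence_py := by
  intro labels _
  unfold Spec_display_sequence_py
  cases labels with
  | nil => rfl
  | cons l0 rest =>
    unfold display_sequence_py display_sequence_py_alt
    rw [if_neg (by simp)]
    simp only [runs_build]
    rw [goB_spec rest [] l0 1 0 (by omega)]
    cases hr : pvRuns l0 1 rest with
    | nil => exact absurd hr (pvRuns_ne_nil _ _ _)
    | cons q qs =>
      obtain ⟨l, c⟩ := q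
      congr 1
      rw [PySem.List.foldl_append_singleton_eq_map, PySem.List.pyRange_one]
      simp only [List.map_map, List.headD_cons, List.tail_cons]
      have hlen : (((((l, c) :: qs : List (String × Int)).length : Int)) - 1).toNat = qs.length := by
        simp
      rw [hlen]
      have hmap : (List.range qs.length).map
          ((fun index =>
            (if (PySem.List.pyGetD ((l, c) :: qs) (index - 1) ("", 0)).2 > 1 ∨
                (PySem.List.pyGetD ((l, c) :: qs) index ("", 0)).2 > 1 then "→" else "|") ++
              (PySem.List.pyGetD ((l, c) :: qs) index ("", 0)).1) ∘ (fun k : Nat => (1 : Int) + k)) =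
          pvAdj c qs := by
        rw [← map_adj qs l c]
        apply List.map_congr_left
        intro k _
        have h2 : ((1 : Int) + k) = (((k + 1 : Nat)) : Int) := by push_cast; omega
        have h3 : ((((k + 1 : Nat)) : Int)) - 1 = ((k : Nat) : Int) := by push_cast; omega
        simp only [Function.comp, h2, h3, PySem.List.pyGetD_natCast]
      rw [hmap]
      simp [pvPiece, PySem.List.pyGetD_zero_cons]
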